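-- pv_equiv track=rewrite | github.com/hzi09/Coding_Test | 프로그래머스/0/181851. 전국 대회 선발 고사/전국 대회 선발 고사.py | solution
-- ===== SOURCE A (Python) =====
-- def solution(rank, attendance):
--     new_rank = []
--     for i,j in zip(rank, attendance) :
--         if j == True :
--             new_rank.append(i)
--     new_rank.sort()
--     student_idx = [rank.index(new_rank[i]) for i in range(3)]
--     return 10000 * student_idx[0] + 100 * student_idx[1] + student_idx[2]
-- ===== SOURCE B (Python) =====
-- def solution(rank, attendance):
--     # Single pass: keep a sorted buffer of the three smallest attending ranks.
--     top3 = []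
--     for r, att in zip(rank, attendance):
--         if att:
--             i = 0
--             while i < len(top3) and top3[i] <= r:
--                 i += 1
--             top3.insert(i, r)
--             del top3[3:]
--     return 10000 * rank.index(top3[0]) + 100 * rank.index(top3[1]) + rank.index(top3[2])
-- ===== Notes on version B (the rewrite author's own statement) =====
-- stated objective: alternative
-- what changed: B replaces the full sort of all attending ranks by a single pass that maintains a sorted buffer of the three smallest attending values (bounded insertion), then computes the same rank.index-based score.
import Mathlib
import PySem

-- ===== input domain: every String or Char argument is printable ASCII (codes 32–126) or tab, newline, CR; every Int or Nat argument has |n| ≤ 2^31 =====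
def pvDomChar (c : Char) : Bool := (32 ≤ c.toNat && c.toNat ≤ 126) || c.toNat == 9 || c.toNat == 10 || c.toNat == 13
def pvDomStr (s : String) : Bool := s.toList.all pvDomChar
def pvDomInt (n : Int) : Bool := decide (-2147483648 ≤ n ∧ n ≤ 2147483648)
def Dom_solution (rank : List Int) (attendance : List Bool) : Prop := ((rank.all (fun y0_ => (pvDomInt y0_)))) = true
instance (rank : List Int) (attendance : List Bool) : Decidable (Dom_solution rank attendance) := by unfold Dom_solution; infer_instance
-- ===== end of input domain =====

-- B replaces the full sort of the attending ranks by a one-pass bounded buffer of the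
-- three smallest attending values (alternative algorithm; same score formula via rank.index).


-- ===== PORT A =====
def solution (rank : List Int) (attendance : List Bool) : Int :=
  let new_rank : List Int :=
    (rank.zip attendance).foldl (fun acc p => if p.2 == true then acc ++ [p.1] else acc) []
  let new_rank := PySem.List.sorted new_rank (fun x => x) false
  let student_idx : List Int :=
    (PySem.List.pyRange 0 3 1).map (fun i =>
      (((PySem.List.pyGet? new_rank i).bind (fun v => PySem.List.index? rank v)).map Int.ofNat).getD 0)
  10000 * ((PySem.List.pyGet? student_idx 0).getD 0)
    + 100 * ((PySem.List.pyGet? student_idx 1).getD 0)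
    + ((PySem.List.pyGet? student_idx 2).getD 0)

-- ===== PORT B =====
-- Source B's while-loop insertion: walk past elements ≤ r, insert r before the first element > r
def pvIns (r : Int) : List Int → List Int
  | [] => [r]
  | x :: xs => if x ≤ r then x :: pvIns r xs else r :: x :: xs

def solution_alt (rank : List Int) (attendance : List Bool) : Int :=
  let top3 : List Int :=
    (rank.zip attendance).foldl (fun buf p => if p.2 then (pvIns p.1 buf).take 3 else buf) []
  10000 * (((PySem.List.pyGet? top3 0).bind (fun v => PySem.List.index? rank v)).map Int.ofNat).getD 0
    + 100 * (((PySem.List.pyGet? top3 1).bind (fun v => PySem.List.index? rank v)).map Int.ofNat).getD 0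
    + (((PySem.List.pyGet? top3 2).bind (fun v => PySem.List.index? rank v)).map Int.ofNat).getD 0

-- ===== PRECONDITION & SPEC =====
-- Pre_ excludes exactly the inputs with fewer than 3 attending students, where A raises IndexError on new_rank[i]
def Pre_solution (rank : List Int) (attendance : List Bool) : Prop :=
  3 ≤ ((rank.zip attendance).filter (fun p => p.2)).length
instance (rank : List Int) (attendance : List Bool) : Decidable (Pre_solution rank attendance) := by unfold Pre_solution; infer_instance
def pvWitness_solution : List Int × List Bool := ([3, 7, 2, 5], [true, true, false, true])

def Spec_solution (rank : List Int) (attendance : List Bool) (out : Int) : Prop := out = solution_alt rank attendance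
instance (rank : List Int) (attendance : List Bool) (out : Int) : Decidable (Spec_solution rank attendance out) := by unfold Spec_solution; infer_instance

-- ===== CLAIM (what is proved, stated in full; the proofs are below) =====
def Claim_equal_solution : Prop := ∀ (rank : List Int) (attendance : List Bool), Dom_solution rank attendance → Pre_solution rank attendance → Spec_solution rank attendance (solution rank attendance)

-- ===== LEMMAS AND PROOFS =====

-- Source B's insertion is the library's insertBy with the strict-less test
theorem pvIns_eq_insertBy (r : Int) (s : List Int) :
    pvIns r s = PySem.List.insertBy (fun a b => decide (a < b)) r s := by
  induction s with
  | nil => rfl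
  | cons x xs ih =>
    simp only [pvIns, PySem.List.insertBy]
    by_cases h : x ≤ r
    · rw [if_pos h, if_neg (by simpa using not_lt.mpr h), ih]
    · rw [if_neg h, if_pos (by simp; omega)]

-- truncating before inserting does not change the truncated result
theorem take_pvIns_take (k : Nat) (r : Int) (s : List Int) :
    (pvIns r (s.take k)).take k = (pvIns r s).take k := by
  induction s generalizing k with
  | nil => simp
  | cons x xs ih =>
    cases k with
    | zero => simp
    | succ m =>
      simp only [List.take_succ_cons, pvIns]
      by_cases h : x ≤ r
      · simp only [if_pos h, List.take_succ_cons, ih m]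
      · simp only [if_neg h, List.take_succ_cons]
        cases m with
        | zero => simp
        | succ n => simp [List.take_take]

-- B's bounded fold is the truncation of the full insertion fold
theorem foldl_take3_eq (f : List Int) (buf : List Int) :
    f.foldl (fun buf x => (pvIns x buf).take 3) (buf.take 3)
      = (f.foldl (fun acc x => pvIns x acc) buf).take 3 := by
  induction f generalizing buf with
  | nil => rfl
  | cons x xs ih =>
    simp only [List.foldl_cons, take_pvIns_take 3 x buf]
    exact ih (pvIns x buf)

-- B's fold over the zipped list equals the fold over the filtered attending values
theorem foldl_if_filter (l : List (Int × Bool)) (buf : List Int) :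
    l.foldl (fun buf p => if p.2 then (pvIns p.1 buf).take 3 else buf) buf
      = ((l.filter (fun p => p.2)).map Prod.fst).foldl (fun buf x => (pvIns x buf).take 3) buf := by
  induction l generalizing buf with
  | nil => rfl
  | cons p t ih =>
    by_cases h : p.2
    · simp [h, ih]
    · simp [h, ih]

-- B's buffer is the first three elements of A's sorted list
theorem top3_eq (l : List (Int × Bool)) :
    l.foldl (fun buf p => if p.2 then (pvIns p.1 buf).take 3 else buf) []
      = (PySem.List.sorted ((l.filter (fun p => p.2)).map Prod.fst) (fun x => x) false).take 3 := by
  rw [foldl_if_filter, PySem.List.sorted_eq_foldl_insertBy]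
  have h := foldl_take3_eq ((l.filter (fun p => p.2)).map Prod.fst) []
  simp only [List.take_nil] at h
  rw [h]
  simp only [pvIns_eq_insertBy]

-- ===== VERDICT (by name: the statement is the Claim_ definition above) =====
theorem solution_spec : Claim_equal_solution := by
  intro rank attendance _ hpre
  unfold Spec_solution solution solution_alt
  rw [top3_eq]
  rw [PySem.List.foldl_append_if (fun p => p.2 == true) Prod.fst _ []]
  have hfe : ((rank.zip attendance).filter (fun p => p.2 == true))
      = ((rank.zip attendance).filter (fun p => p.2)) := by simp
  rw [hfe]
  set f := ((rank.zip attendance).filter (fun p => p.2)).map Prod.fst with hf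
  have hlen : 3 ≤ (PySem.List.sorted f (fun x => x) false).length := by
    rw [PySem.List.length_sorted]
    simpa [hf] using hpre
  set s := PySem.List.sorted f (fun x => x) false with hs
  match s, hlen with
  | a :: b :: c :: t, _ =>
    dsimp only
    simp only [List.nil_append]
    rw [← hs]
    simp [PySem.List.pyRange, PySem.List.pyGet?, PySem.List.pyIdx?]
    split_ifs with h1 h2 h3
    · simp
    all_goals omega
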